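-- pv_equiv track=rewrite | github.com/BhuvaneshBhatt/SpecialFunctions | MultiplePolylogarithms/src/hpl.py | to_abbreviated_notation
-- ===== SOURCE A (Python) =====
-- def to_abbreviated_notation(avec: tuple[int, ...]) -> tuple[int, ...]:
--     """
--     Convert full notation to abbreviated notation.
--
--     Runs of zeros preceding a ±1 are collapsed: (0,0,1) -> 3, (0,0,-1) -> -3.
--     Trailing zeros are left unchanged.
--
--     Examples
--     --------
--     >>> to_abbreviated_notation((0, 1, -1))
--     (2, -1)
--     >>> to_abbreviated_notation((0, 0, 1))
--     (3,)
--     >>> to_abbreviated_notation((1, 0, -1))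
--     (1, 0, -1)
--     """
--     if not avec:
--         return ()
--     result = []
--     i = 0
--     n = len(avec)
--     while i < n:
--         if avec[i] == 0:
--             # count consecutive zeros
--             j = i
--             while j < n and avec[j] == 0:
--                 j += 1
--             if j < n and avec[j] in (1, -1):
--                 # zeros + nonzero → compressed form
--                 nzeros = j - i
--                 sign = avec[j]
--                 result.append(sign * (nzeros + 1))
--                 i = j + 1
--             else:
--                 # trailing zeros: keep as-is
--                 result.extend([0] * (j - i))
--                 i = j
--         else:
--             result.append(avec[i])
--             i += 1
--     return tuple(result)
-- ===== SOURCE B (Python) =====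
-- def to_abbreviated_notation(avec: tuple[int, ...]) -> tuple[int, ...]:
--     """Single flat pass with a pending-zeros counter instead of an
--     index-based outer loop with an inner zero-scanning while-loop."""
--     result = []
--     zeros = 0
--     for x in avec:
--         if x == 0:
--             zeros += 1
--         elif x in (1, -1):
--             result.append(x * (zeros + 1))
--             zeros = 0
--         else:
--             result.extend([0] * zeros)
--             result.append(x)
--             zeros = 0
--     result.extend([0] * zeros)
--     return tuple(result)
-- ===== Notes on version B (the rewrite author's own statement) =====
-- stated objective: simpler
-- what changed: Replaced the index-based outer loop with an inner zero-counting while-loop by one flat pass over the elements that keeps a pending-zeros counter and flushes it on each nonzero element and at the end.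
import Mathlib
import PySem

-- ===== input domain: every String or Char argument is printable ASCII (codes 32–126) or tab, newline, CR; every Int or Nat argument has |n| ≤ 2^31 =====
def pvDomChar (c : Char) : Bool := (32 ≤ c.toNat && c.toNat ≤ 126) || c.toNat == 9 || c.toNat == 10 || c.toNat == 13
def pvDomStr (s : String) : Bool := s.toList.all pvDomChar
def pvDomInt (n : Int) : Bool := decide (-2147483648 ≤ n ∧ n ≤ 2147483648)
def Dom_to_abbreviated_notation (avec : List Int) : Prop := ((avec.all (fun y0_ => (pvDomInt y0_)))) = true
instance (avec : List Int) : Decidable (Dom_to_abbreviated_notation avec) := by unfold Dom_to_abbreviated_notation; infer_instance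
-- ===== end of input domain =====

-- B replaces A's index-based outer loop + inner zero-scanning while-loop by one flat
-- pass carrying a pending-zeros counter (objective: simpler); return values proved equal.


-- ===== PORT A =====
-- inner 'while j < n and avec[j] == 0: j += 1': number of leading zeros of the remaining suffix
def pvClz (xs : List Int) : Nat :=
  match xs with
  | [] => 0
  | x :: r => if x = 0 then pvClz r + 1 else 0

-- outer 'while i < n' ported as recursion on the remaining suffix avec[i:];
-- the zero branch consumes the whole zero run (zs = j - i) at once, as A does.
def to_abbreviated_notation (avec : List Int) : List Int :=
  match avec with
  | [] => []
  | x :: rest =>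
    if x = 0 then
      let zs := pvClz rest + 1
      match h : rest.drop (pvClz rest) with
      | y :: t =>
        if y = 1 ∨ y = -1 then (y * (zs + 1)) :: to_abbreviated_notation t
        else List.replicate zs 0 ++ to_abbreviated_notation (y :: t)
      | [] => List.replicate zs 0
    else x :: to_abbreviated_notation rest
termination_by avec.length
decreasing_by
  all_goals first
  | (have := congrArg List.length h; simp [List.length_drop] at this; simp; omega)
  | simp

-- ===== PORT B =====
-- the flat for-loop of Source B: state = pending-zeros counter; trailing 'extend([0]*zeros)'
def pvGoB (zeros : Nat) (xs : List Int) : List Int :=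
  match xs with
  | [] => List.replicate zeros 0
  | x :: rest =>
    if x = 0 then pvGoB (zeros + 1) rest
    else if x = 1 ∨ x = -1 then (x * ((zeros : Int) + 1)) :: pvGoB 0 rest
    else List.replicate zeros 0 ++ x :: pvGoB 0 rest

def to_abbreviated_notation_alt (avec : List Int) : List Int := pvGoB 0 avec

-- ===== PRECONDITION & SPEC =====
def Spec_to_abbreviated_notation (avec : List Int) (out : List Int) : Prop := out = to_abbreviated_notation_alt avec
instance (avec : List Int) (out : List Int) : Decidable (Spec_to_abbreviated_notation avec out) := by unfold Spec_to_abbreviated_notation; infer_instance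

-- ===== CLAIM (what is proved, stated in full; the proofs are below) =====
def Claim_equal_to_abbreviated_notation : Prop := ∀ (avec : List Int), Dom_to_abbreviated_notation avec → Spec_to_abbreviated_notation avec (to_abbreviated_notation avec)

-- ===== LEMMAS AND PROOFS =====

-- dropping the leading zero run leaves a list with nonzero head (or nothing)
theorem pvClz_drop_head (xs : List Int) :
    ∀ y t, xs.drop (pvClz xs) = y :: t → y ≠ 0 := by
  induction xs with
  | nil => intro y t h; simp at h
  | cons x r ih =>
    intro y t h
    by_cases hx : x = 0
    · simp [pvClz, hx] at h
      exact ih y t h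
    · simp [pvClz, hx] at h
      obtain ⟨h1, _⟩ := h
      subst h1
      exact hx

-- a list is its leading zero run followed by the remainder
theorem pvClz_decomp (xs : List Int) :
    xs = List.replicate (pvClz xs) 0 ++ xs.drop (pvClz xs) := by
  induction xs with
  | nil => rfl
  | cons x r ih =>
    by_cases hx : x = 0
    · simp [pvClz, hx, List.replicate_succ]
      exact ih
    · simp [pvClz, hx]

-- B absorbs a prepended zero run into its counter
theorem pvGoB_replicate (k z : Nat) (ys : List Int) :
    pvGoB z (List.replicate k 0 ++ ys) = pvGoB (z + k) ys := by
  induction k generalizing z with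
  | zero => simp
  | succ n ih =>
    simp [List.replicate_succ, pvGoB]
    rw [ih]
    congr 1
    omega

-- unfolding A on a zero run ending in ±1
theorem pvA_zero_pm1 (r : List Int) (y : Int) (t : List Int)
    (h : r.drop (pvClz r) = y :: t) (hy : y = 1 ∨ y = -1) :
    to_abbreviated_notation (0 :: r)
      = (y * (((pvClz r : Int) + 1) + 1)) :: to_abbreviated_notation t := by
  rw [to_abbreviated_notation, if_pos rfl]
  split
  next y' t' h' =>
    rw [h] at h'
    obtain ⟨rfl, rfl⟩ : y = y' ∧ t = t' := by simp_all
    simp [hy]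
  next h' => rw [h] at h'; simp at h'

-- unfolding A on a zero run ending in an other nonzero
theorem pvA_zero_other (r : List Int) (y : Int) (t : List Int)
    (h : r.drop (pvClz r) = y :: t) (hy : ¬(y = 1 ∨ y = -1)) :
    to_abbreviated_notation (0 :: r)
      = List.replicate (pvClz r + 1) 0 ++ to_abbreviated_notation (y :: t) := by
  rw [to_abbreviated_notation, if_pos rfl]
  split
  next y' t' h' =>
    rw [h] at h'
    obtain ⟨rfl, rfl⟩ : y = y' ∧ t = t' := by simp_all
    simp [hy]
  next h' => rw [h] at h'; simp at h'

-- unfolding A on a trailing zero run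
theorem pvA_zero_trailing (r : List Int) (h : r.drop (pvClz r) = []) :
    to_abbreviated_notation (0 :: r) = List.replicate (pvClz r + 1) 0 := by
  rw [to_abbreviated_notation, if_pos rfl]
  split
  next y' t' h' => rw [h] at h'; simp at h'
  next _ => rfl

-- unfolding A on a nonzero head
theorem pvA_nonzero (x : Int) (r : List Int) (hx : x ≠ 0) :
    to_abbreviated_notation (x :: r) = x :: to_abbreviated_notation r := by
  rw [to_abbreviated_notation, if_neg hx]

-- the zero-run decomposition of 0 :: r, phrased for pvGoB_replicate
theorem pvZero_cons_decomp (r : List Int) :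
    (0 : Int) :: r = List.replicate (pvClz r + 1) 0 ++ r.drop (pvClz r) := by
  have := pvClz_decomp r
  calc (0 : Int) :: r
      = 0 :: (List.replicate (pvClz r) 0 ++ r.drop (pvClz r)) := by rw [← this]
    _ = _ := by simp [List.replicate_succ]

theorem pvPortA_eq_goB (avec : List Int) :
    to_abbreviated_notation avec = pvGoB 0 avec := by
  induction avec using to_abbreviated_notation.induct with
  | case1 => simp [to_abbreviated_notation, pvGoB]
  | case2 r y t h hy ih =>
    rw [pvA_zero_pm1 r y t h hy, pvZero_cons_decomp r, h, pvGoB_replicate]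
    have hy0 : y ≠ 0 := pvClz_drop_head r y t h
    rw [pvGoB]
    simp only [if_neg hy0, if_pos hy, ih]
    congr 1
    push_cast
    ring
  | case3 r y t h hy ih =>
    rw [pvA_zero_other r y t h hy, pvZero_cons_decomp r, h, pvGoB_replicate]
    have hy0 : y ≠ 0 := pvClz_drop_head r y t h
    rw [pvGoB]
    simp only [if_neg hy0, if_neg hy]
    rw [ih, pvGoB]
    simp only [if_neg hy0, if_neg hy]
    simp
  | case4 r h =>
    rw [pvA_zero_trailing r h]
    have : (0 : Int) :: r = List.replicate (pvClz r + 1) 0 ++ [] := by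
      rw [pvZero_cons_decomp r, h]
    rw [this, pvGoB_replicate, pvGoB]
    simp
  | case5 x r hx ih =>
    rw [pvA_nonzero x r hx, pvGoB]
    simp only [if_neg hx]
    by_cases hy : x = 1 ∨ x = -1
    · simp only [if_pos hy, ih]
      congr 1
      rcases hy with rfl | rfl <;> norm_num
    · simp [hy, ih]

-- ===== VERDICT (by name: the statement is the Claim_ definition above) =====
theorem to_abbreviated_notation_spec : Claim_equal_to_abbreviated_notation := by
  intro avec _
  unfold Spec_to_abbreviated_notation to_abbreviated_notation_alt
  exact pvPortA_eq_goB avec
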